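-- pv_equiv track=rewrite | github.com/TINLEO-cd/sheep | yyg_assist_templates_fixed_v2.py | _apply_pick
-- ===== SOURCE A (Python) =====
-- SLOT_CAP = 7  # YYG slot length
--
-- def _apply_pick(slot, gid):
--     """
--     Apply YYG rule: append gid to slot; if any gid appears 3 times -> remove all 3.
--     Return new_slot, cleared(0/1), overflow(0/1)
--     """
--     s=list(slot)
--     s.append(gid)
--     if len(s) > SLOT_CAP:
--         return tuple(s), 0, 1
--     # clear triples (can clear multiple types in theory, but in YYG usually one)
--     cleared=0
--     from collections import Counter
--     c=Counter(s)
--     for tg, cnt in list(c.items()):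
--         if cnt>=3:
--             cleared += 1
--             # remove exactly 3 occurrences
--             removed=0
--             ns=[]
--             for x in s:
--                 if x==tg and removed<3:
--                     removed+=1
--                 else:
--                     ns.append(x)
--             s=ns
--     return tuple(s), cleared, 0
-- ===== SOURCE B (Python) =====
-- SLOT_CAP = 7  # YYG slot length
--
-- def _apply_pick(slot, gid):
--     s = list(slot)
--     s.append(gid)
--     if len(s) > SLOT_CAP:
--         return tuple(s), 0, 1
--     counts = {}
--     for x in s:
--         counts[x] = counts.get(x, 0) + 1
--     budget = {g: 3 for g, c in counts.items() if c >= 3}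
--     cleared = len(budget)
--     res = []
--     for x in s:
--         b = budget.get(x, 0)
--         if b > 0:
--             budget[x] = b - 1
--         else:
--             res.append(x)
--     return tuple(res), cleared, 0
-- ===== Notes on version B (the rewrite author's own statement) =====
-- stated objective: simpler
-- what changed: A rebuilds the whole slot list once per triple gid (outer loop over Counter items, inner rebuild pass each time); B counts once, fixes a per-gid removal budget of 3 for gids with count >= 3, and builds the result in a single order-preserving pass over the slot.
import Mathlib
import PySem

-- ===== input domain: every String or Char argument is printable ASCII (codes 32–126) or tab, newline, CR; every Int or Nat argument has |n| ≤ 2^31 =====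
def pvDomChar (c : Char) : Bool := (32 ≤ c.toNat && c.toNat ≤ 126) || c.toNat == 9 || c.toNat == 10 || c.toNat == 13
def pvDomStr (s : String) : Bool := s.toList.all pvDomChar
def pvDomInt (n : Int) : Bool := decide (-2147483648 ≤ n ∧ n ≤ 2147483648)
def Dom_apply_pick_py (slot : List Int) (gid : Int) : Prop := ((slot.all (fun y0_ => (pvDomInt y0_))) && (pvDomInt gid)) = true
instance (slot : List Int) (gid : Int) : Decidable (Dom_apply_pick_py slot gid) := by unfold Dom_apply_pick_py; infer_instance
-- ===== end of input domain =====

-- B replaces A's per-triple list-rebuild loops with one Counter, a budget dict and a single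
-- order-preserving pass (objective: simpler decomposition, same cost).

-- ===== PORT A =====
-- inner loop of A: remove up to 3 occurrences of tg, state (removed, ns)
def pyInnerA (tg : Int) (s : List Int) : Int × List Int :=
  s.foldl (fun (q : Int × List Int) x =>
    if x = tg ∧ q.1 < 3 then (q.1 + 1, q.2) else (q.1, q.2 ++ [x])) (0, [])

-- outer loop of A over the counter items, state (cleared, s)
def pyOuterA (items : List (Int × Int)) (cl : Int) (s : List Int) : Int × List Int :=
  items.foldl (fun (st : Int × List Int) p =>
    if p.2 ≥ 3 then (st.1 + 1, (pyInnerA p.1 st.2).2) else st) (cl, s)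

def apply_pick_py (slot : List Int) (gid : Int) : List Int × Int × Int :=
  let s := slot ++ [gid]
  if s.length > 7 then (s, 0, 1)
  else
    let c := PySem.Dict.counter s
    let st := pyOuterA c.items 0 s
    (st.2, st.1, 0)

-- ===== PORT B =====
-- counts[x] = counts.get(x, 0) + 1 loop
def bCounts (s : List Int) : PySem.Dict Int Int :=
  s.foldl (fun (d : PySem.Dict Int Int) x => d.insert x (d.getD x 0 + 1)) PySem.Dict.empty

-- budget = {g: 3 for g, c in counts.items() if c >= 3}
def bBudget (counts : PySem.Dict Int Int) : PySem.Dict Int Int :=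
  (counts.items.filter (fun p => p.2 ≥ 3)).foldl
    (fun (d : PySem.Dict Int Int) p => d.insert p.1 3) PySem.Dict.empty

-- single pass over s, state (budget, res)
def bPass (budget : PySem.Dict Int Int) (s : List Int) : PySem.Dict Int Int × List Int :=
  s.foldl (fun (q : PySem.Dict Int Int × List Int) x =>
    let b := q.1.getD x 0
    if b > 0 then (q.1.insert x (b - 1), q.2) else (q.1, q.2 ++ [x])) (budget, [])

def apply_pick_py_alt (slot : List Int) (gid : Int) : List Int × Int × Int :=
  let s := slot ++ [gid]
  if s.length > 7 then (s, 0, 1)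
  else
    let counts := bCounts s
    let budget := bBudget counts
    let cleared : Int := budget.size
    ((bPass budget s).2, cleared, 0)

-- ===== PRECONDITION & SPEC =====
def Spec_apply_pick_py (slot : List Int) (gid : Int) (out : List Int × Int × Int) : Prop := out = apply_pick_py_alt slot gid
instance (slot : List Int) (gid : Int) (out : List Int × Int × Int) : Decidable (Spec_apply_pick_py slot gid out) := by unfold Spec_apply_pick_py; infer_instance

-- ===== CLAIM (what is proved, stated in full; the proofs are below) =====
def Claim_equal_apply_pick_py : Prop := ∀ (slot : List Int) (gid : Int), Dom_apply_pick_py slot gid → Spec_apply_pick_py slot gid (apply_pick_py slot gid)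

-- ===== LEMMAS AND PROOFS =====

-- remove the first n occurrences of tg
def removeN (tg : Int) (n : Nat) : List Int → List Int
  | [] => []
  | x :: xs => if x = tg ∧ n > 0 then removeN tg (n - 1) xs else x :: removeN tg n xs

-- sequential removals: for each g in G remove the first (B g) occurrences
def seqB (G : List Int) (B : Int → Int) (s : List Int) : List Int :=
  G.foldl (fun t g => removeN g (B g).toNat t) s

-- simultaneous single-pass removal with budget function B
def simulF (B : Int → Int) : List Int → List Int
  | [] => []
  | x :: xs => if B x > 0 then simulF (fun y => if y = x then B x - 1 else B y) xs else x :: simulF B xs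

theorem pyInnerA_snd (tg : Int) (xs : List Int) : ∀ (r : Int) (acc : List Int), 0 ≤ r →
    (xs.foldl (fun (q : Int × List Int) x =>
      if x = tg ∧ q.1 < 3 then (q.1 + 1, q.2) else (q.1, q.2 ++ [x])) (r, acc)).2
    = acc ++ removeN tg (3 - r).toNat xs := by
  induction xs with
  | nil => intro r acc _; simp [removeN]
  | cons x xs ih =>
    intro r acc hr
    by_cases h : x = tg ∧ r < 3
    · have hpos : x = tg ∧ (3 - r).toNat > 0 := ⟨h.1, by omega⟩
      have h3 : (3 - r).toNat - 1 = (3 - (r + 1)).toNat := by omega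
      rw [List.foldl_cons, if_pos h, ih (r + 1) acc (by omega)]
      simp only [removeN, if_pos hpos, h3]
    · simp only [List.foldl_cons, if_neg h]
      rw [ih r (acc ++ [x]) hr, List.append_assoc]
      by_cases hx : x = tg
      · have : ¬ ((3 - r).toNat > 0) := by omega
        simp [removeN, hx, this]
      · simp [removeN, hx]

theorem pyInnerA_eq (tg : Int) (s : List Int) : (pyInnerA tg s).2 = removeN tg 3 s := by
  have := pyInnerA_snd tg s 0 [] le_rfl
  simpa [pyInnerA] using this

theorem pyOuterA_eq (items : List (Int × Int)) : ∀ (cl : Int) (s : List Int),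
    pyOuterA items cl s
    = (cl + ((items.filter (fun p => p.2 ≥ 3)).length : Int),
       seqB ((items.filter (fun p => p.2 ≥ 3)).map (·.1)) (fun _ => 3) s) := by
  induction items with
  | nil => intro cl s; simp [pyOuterA, seqB]
  | cons p rest ih =>
    intro cl s
    by_cases h : p.2 ≥ 3
    · have : pyOuterA (p :: rest) cl s = pyOuterA rest (cl + 1) ((pyInnerA p.1 s).2) := by
        simp [pyOuterA, h]
      rw [this, ih, pyInnerA_eq]
      simp only [List.filter_cons, h, decide_true, if_true, List.length_cons, List.map_cons,
        Prod.mk.injEq]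
      constructor
      · push_cast; ring
      · simp [seqB]
    · have : pyOuterA (p :: rest) cl s = pyOuterA rest cl s := by simp [pyOuterA, h]
      rw [this, ih]
      simp [h]

theorem seqB_nil (G : List Int) (B : Int → Int) : seqB G B [] = [] := by
  induction G generalizing B with
  | nil => rfl
  | cons g gs ih => simp [seqB, removeN] at *; exact ih _

theorem seqB_congr (G : List Int) (B B' : Int → Int) (h : ∀ g ∈ G, B g = B' g) (s : List Int) :
    seqB G B s = seqB G B' s := by
  induction G generalizing s with
  | nil => rfl
  | cons g gs ih =>
    simp only [seqB, List.foldl_cons] at *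
    rw [h g (by simp)]
    exact ih (fun g hg => h g (by simp [hg])) _

theorem seqB_cons (g : Int) (gs : List Int) (B : Int → Int) (s : List Int) :
    seqB (g :: gs) B s = seqB gs B (removeN g (B g).toNat s) := rfl

theorem seqB_cons_elem (G : List Int) : ∀ (B : Int → Int) (x : Int) (xs : List Int), G.Nodup →
    seqB G B (x :: xs)
    = if x ∈ G ∧ B x > 0 then seqB G (fun y => if y = x then B x - 1 else B y) xs
      else x :: seqB G B xs := by
  induction G with
  | nil => intro B x xs _; simp [seqB]
  | cons g gs ih =>
    intro B x xs hnd
    have hgnd : gs.Nodup := hnd.of_cons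
    have hgmem : g ∉ gs := by simpa using (List.nodup_cons.mp hnd).1
    by_cases hx : x = g
    · subst hx
      by_cases hb : B x > 0
      · have hrm : removeN x (B x).toNat (x :: xs) = removeN x (B x - 1).toNat xs := by
          have hpos : (B x).toNat > 0 := by omega
          have h2 : (B x).toNat - 1 = (B x - 1).toNat := by omega
          simp only [removeN]
          rw [if_pos ⟨trivial, hpos⟩, h2]
        have hcnd : x ∈ x :: gs ∧ B x > 0 := ⟨by simp, hb⟩
        rw [seqB_cons, hrm, if_pos hcnd, seqB_cons]
        have he : ((if x = x then B x - 1 else B x)).toNat = (B x - 1).toNat := by simp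
        rw [he]
        apply seqB_congr
        intro a ha
        have hax : ¬ (a = x) := fun he' => hgmem (he' ▸ ha)
        simp [hax]
      · have hrm : removeN x (B x).toNat (x :: xs) = x :: removeN x (B x).toNat xs := by
          have hz : ¬ ((B x).toNat > 0) := by omega
          simp [removeN, hz]
        have hcnd : ¬ (x ∈ x :: gs ∧ B x > 0) := fun h => hb h.2
        have hcnd2 : ¬ (x ∈ gs ∧ B x > 0) := fun h => hb h.2
        rw [seqB_cons, hrm, ih B x _ hgnd, if_neg hcnd2, if_neg hcnd, seqB_cons]
    · have hrm : removeN g (B g).toNat (x :: xs) = x :: removeN g (B g).toNat xs := by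
        have hz : ¬ (x = g ∧ (B g).toNat > 0) := fun h => hx h.1
        simp only [removeN, if_neg hz]
      rw [seqB_cons, hrm, ih B x _ hgnd]
      by_cases hc : x ∈ gs ∧ B x > 0
      · have hc' : x ∈ g :: gs ∧ B x > 0 := ⟨List.mem_cons_of_mem _ hc.1, hc.2⟩
        rw [if_pos hc, if_pos hc', seqB_cons]
        have he : ((if g = x then B x - 1 else B g)).toNat = (B g).toNat := by
          rw [if_neg (fun h => hx (Eq.symm h))]
        rw [he]
      · have hc' : ¬ (x ∈ g :: gs ∧ B x > 0) := by
          rintro ⟨hm, hb⟩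
          rcases List.mem_cons.mp hm with h | h
          · exact hx h
          · exact hc ⟨h, hb⟩
        rw [if_neg hc, if_neg hc', seqB_cons]

theorem simulF_eq_seqB (xs : List Int) : ∀ (G : List Int) (B : Int → Int), G.Nodup →
    (∀ g, B g > 0 → g ∈ G) → simulF B xs = seqB G B xs := by
  induction xs with
  | nil => intro G B _ _; rw [seqB_nil]; rfl
  | cons x xs ih =>
    intro G B hnd hsup
    rw [seqB_cons_elem G B x xs hnd]
    by_cases hb : B x > 0
    · have hmem : x ∈ G := hsup x hb
      rw [if_pos ⟨hmem, hb⟩]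
      show simulF B (x :: xs) = _
      simp only [simulF, if_pos hb]
      apply ih G _ hnd
      intro g hg
      by_cases hgx : g = x
      · exact hgx ▸ hmem
      · exact hsup g (by simpa [hgx] using hg)
    · have : ¬ (x ∈ G ∧ B x > 0) := fun h => hb h.2
      rw [if_neg this]
      show simulF B (x :: xs) = _
      simp only [simulF, if_neg hb]
      rw [ih G B hnd hsup]

theorem bPass_snd (xs : List Int) : ∀ (d : PySem.Dict Int Int) (acc : List Int),
    (xs.foldl (fun (q : PySem.Dict Int Int × List Int) x =>
      let b := q.1.getD x 0
      if b > 0 then (q.1.insert x (b - 1), q.2) else (q.1, q.2 ++ [x])) (d, acc)).2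
    = acc ++ simulF (fun x => d.getD x 0) xs := by
  induction xs with
  | nil => intro d acc; simp [simulF]
  | cons x xs ih =>
    intro d acc
    by_cases hb : d.getD x 0 > 0
    · simp only [List.foldl_cons, if_pos hb]
      rw [ih]
      have hfun : (fun y => (d.insert x (d.getD x 0 - 1)).getD y 0)
          = (fun y => if y = x then d.getD x 0 - 1 else d.getD y 0) := by
        funext y
        rw [PySem.Dict.getD_insert]
      simp only [simulF, if_pos hb, hfun]
    · simp only [List.foldl_cons, if_neg hb]
      rw [ih, List.append_assoc]
      simp [simulF, hb]

theorem budget_items (s : List Int) :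
    (bBudget (PySem.Dict.counter s)).items
    = ((PySem.Dict.counter s).items.filter (fun p => p.2 ≥ 3)).map (fun p => (p.1, (3 : Int))) := by
  have hG : (((PySem.Dict.counter s).items.filter (fun p => p.2 ≥ 3)).map (·.1)).Nodup := by
    have hsub : (((PySem.Dict.counter s).items.filter (fun p => p.2 ≥ 3)).map (·.1)).Sublist
        ((PySem.Dict.counter s).items.map (·.1)) :=
      List.Sublist.map _ List.filter_sublist
    have hk : ((PySem.Dict.counter s).items.map (·.1)).Nodup := by
      have := PySem.Dict.nodup_keys_counter (κ := Int) s
      simpa [PySem.Dict.keys] using this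
    exact hk.sublist hsub
  have := PySem.Dict.items_foldl_insert_fresh
    (l := (PySem.Dict.counter s).items.filter (fun p => p.2 ≥ 3))
    (k := fun p => p.1) (v := fun _ => (3 : Int)) (d := PySem.Dict.empty)
    (by intro a _; simp) hG
  simpa [bBudget] using this

theorem budget_keys_nodup (s : List Int) : (bBudget (PySem.Dict.counter s)).keys.Nodup := by
  have h := budget_items s
  have hG : (((PySem.Dict.counter s).items.filter (fun p => p.2 ≥ 3)).map (·.1)).Nodup := by
    have hsub : (((PySem.Dict.counter s).items.filter (fun p => p.2 ≥ 3)).map (·.1)).Sublist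
        ((PySem.Dict.counter s).items.map (·.1)) :=
      List.Sublist.map _ List.filter_sublist
    have hk : ((PySem.Dict.counter s).items.map (·.1)).Nodup := by
      have := PySem.Dict.nodup_keys_counter (κ := Int) s
      simpa [PySem.Dict.keys] using this
    exact hk.sublist hsub
  simp only [PySem.Dict.keys, h, List.map_map]
  simpa [Function.comp] using hG

theorem budget_getD (s : List Int) (g : Int) :
    (bBudget (PySem.Dict.counter s)).getD g 0
    = if g ∈ ((PySem.Dict.counter s).items.filter (fun p => p.2 ≥ 3)).map (·.1) then 3 else 0 := by
  by_cases hm : g ∈ ((PySem.Dict.counter s).items.filter (fun p => p.2 ≥ 3)).map (·.1)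
  · rw [if_pos hm]
    obtain ⟨p, hp, hpg⟩ := List.mem_map.mp hm
    have hmem : (g, (3 : Int)) ∈ (bBudget (PySem.Dict.counter s)).items := by
      rw [budget_items]
      exact List.mem_map.mpr ⟨p, hp, by simp [hpg]⟩
    exact PySem.Dict.getD_of_mem_items _ hmem (budget_keys_nodup s) 0
  · rw [if_neg hm]
    apply PySem.Dict.getD_of_not_contains
    rw [PySem.Dict.contains_eq_decide_mem_keys]
    simp only [decide_eq_false_iff_not]
    intro hk
    apply hm
    simpa [PySem.Dict.keys, budget_items s, List.map_map, Function.comp] using hk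

theorem apply_pick_core (slot : List Int) (gid : Int) :
    apply_pick_py slot gid = apply_pick_py_alt slot gid := by
  unfold apply_pick_py apply_pick_py_alt
  by_cases hlen : (slot ++ [gid]).length > 7
  · rw [if_pos hlen, if_pos hlen]
  · rw [if_neg hlen, if_neg hlen]
    set s := slot ++ [gid] with hs
    show ((pyOuterA (PySem.Dict.counter s).items 0 s).2, (pyOuterA (PySem.Dict.counter s).items 0 s).1, 0)
      = ((bPass (bBudget (bCounts s)) s).2, ((bBudget (bCounts s)).size : Int), 0)
    have hcnt : bCounts s = PySem.Dict.counter s := by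
      simpa [bCounts] using PySem.Dict.foldl_insert_getD_add_one_eq_counter (xs := s)
    set F := (PySem.Dict.counter s).items.filter (fun p => p.2 ≥ 3) with hF
    set G := F.map (·.1) with hGdef
    have hGnd : G.Nodup := by
      have hsub : G.Sublist ((PySem.Dict.counter s).items.map (·.1)) :=
        List.Sublist.map _ List.filter_sublist
      have hk : ((PySem.Dict.counter s).items.map (·.1)).Nodup := by
        have := PySem.Dict.nodup_keys_counter (κ := Int) s
        simpa [PySem.Dict.keys] using this
      exact hk.sublist hsub
    have houter := pyOuterA_eq (PySem.Dict.counter s).items 0 s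
    have hpass : (bPass (bBudget (bCounts s)) s).2
        = simulF (fun x => (bBudget (PySem.Dict.counter s)).getD x 0) s := by
      rw [hcnt]
      simpa [bPass] using bPass_snd s (bBudget (PySem.Dict.counter s)) []
    have hBfun : (fun x => (bBudget (PySem.Dict.counter s)).getD x 0)
        = (fun g => if g ∈ G then (3 : Int) else 0) := by
      funext g; exact budget_getD s g
    have hsim : simulF (fun x => (bBudget (PySem.Dict.counter s)).getD x 0) s
        = seqB G (fun _ => 3) s := by
      rw [hBfun]
      rw [simulF_eq_seqB s G _ hGnd (by intro g hg; by_contra hm; simp [hm] at hg)]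
      apply seqB_congr
      intro g hg; simp [hg]
    have hsize : ((bBudget (bCounts s)).size : Int) = (F.length : Int) := by
      rw [hcnt]
      have : (bBudget (PySem.Dict.counter s)).items.length = F.length := by
        rw [budget_items s]; simp [hF]
      simpa [PySem.Dict.size] using this
    rw [hpass, hsim, houter]
    simp only [zero_add]
    exact congrArg _ (by rw [hsize])

-- ===== VERDICT (by name: the statement is the Claim_ definition above) =====
theorem apply_pick_py_spec : Claim_equal_apply_pick_py := by
  intro slot gid _
  unfold Spec_apply_pick_py
  exact apply_pick_core slot gid
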